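-- pv_equiv track=rewrite | github.com/AcaciaCalegari/pythonUFRJ | aula07/google2-lista7.py | vogal
-- ===== SOURCE A (Python) =====
-- def vogal(plv):
--     i=0
--     vg=''
--     while i<len(plv):
--         if plv[i] in 'AEIOUaeiou':
--             vg=plv[i]
--         i=i+1
--     return vg
-- ===== SOURCE B (Python) =====
-- def vogal(plv):
--     for ch in reversed(plv):
--         if ch in 'AEIOUaeiou':
--             return ch
--     return ''
-- ===== Notes on version B (the rewrite author's own statement) =====
-- stated objective: faster
-- what changed: Replaces A's forward index-based whole-string scan that keeps overwriting the last vowel seen with a reverse for-loop that early-returns on the first vowel found.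
import Mathlib
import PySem

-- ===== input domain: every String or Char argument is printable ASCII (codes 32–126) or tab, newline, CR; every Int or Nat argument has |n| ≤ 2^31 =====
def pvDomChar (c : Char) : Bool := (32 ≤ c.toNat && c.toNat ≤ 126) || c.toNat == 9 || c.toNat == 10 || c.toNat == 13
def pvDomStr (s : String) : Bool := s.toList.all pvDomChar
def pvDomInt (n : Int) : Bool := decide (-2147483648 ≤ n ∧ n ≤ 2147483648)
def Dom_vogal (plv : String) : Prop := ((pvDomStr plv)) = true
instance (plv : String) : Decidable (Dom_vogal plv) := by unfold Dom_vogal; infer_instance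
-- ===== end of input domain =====

-- B replaces A's forward scan (overwrite last vowel seen) with a reverse scan returning the first vowel found; same vowel set, same results.

-- membership test `c in 'AEIOUaeiou'` (single char in string = char membership)
def isVowel (c : Char) : Bool := ['A','E','I','O','U','a','e','i','o','u'].contains c

-- ===== PORT A =====
-- A's while loop walks the chars left to right, overwriting vg with each vowel: a foldl over the chars.
def vogal (plv : String) : String :=
  plv.toList.foldl (fun vg c => if isVowel c then String.ofList [c] else vg) ""

-- ===== PORT B =====
-- B's for loop over reversed(plv) with early return: structural recursion on the reversed char list.
def vogalRev : List Char → String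
  | [] => ""
  | c :: r => if isVowel c then String.ofList [c] else vogalRev r

def vogal_alt (plv : String) : String := vogalRev plv.toList.reverse

-- ===== PRECONDITION & SPEC =====
def Spec_vogal (plv : String) (out : String) : Prop := out = vogal_alt plv
instance (plv : String) (out : String) : Decidable (Spec_vogal plv out) := by unfold Spec_vogal; infer_instance

-- ===== CLAIM (what is proved, stated in full; the proofs are below) =====
def Claim_equal_vogal : Prop := ∀ (plv : String), Dom_vogal plv → Spec_vogal plv (vogal plv)

-- ===== LEMMAS AND PROOFS =====

-- B's reverse scan returns the first vowel of its argument (as a 1-char string), "" if none.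
theorem vogalRev_eq_find (l : List Char) :
    vogalRev l = match l.find? isVowel with | some c => String.ofList [c] | none => "" := by
  induction l with
  | nil => rfl
  | cons c r ih =>
    simp only [vogalRev, List.find?]
    cases h : isVowel c <;> simp [ih]

-- A's fold from any accumulator equals the first vowel of the REVERSED list, or the accumulator.
theorem foldl_eq_find_rev (l : List Char) (acc : String) :
    l.foldl (fun vg c => if isVowel c then String.ofList [c] else vg) acc =
      match l.reverse.find? isVowel with | some c => String.ofList [c] | none => acc := by
  induction l generalizing acc with
  | nil => rfl
  | cons c r ih =>
    simp only [List.foldl, List.reverse_cons]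
    rw [ih]
    rcases h : r.reverse.find? isVowel with _ | d
    · cases hv : isVowel c <;> simp [List.find?_append, h, List.find?, hv]
    · simp [List.find?_append, h]

-- ===== VERDICT (by name: the statement is the Claim_ definition above) =====
theorem vogal_spec : Claim_equal_vogal := by
  intro plv _
  show vogal plv = vogal_alt plv
  rw [vogal, vogal_alt, foldl_eq_find_rev, vogalRev_eq_find]
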